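-- pv_equiv track=rewrite | github.com/pypi-data/pypi-mirror-401 | packages/sigil-pipeline/sigil_pipeline-2.6.2-py3-none-any.whl/sigil_pipeline/ast_patterns.py | _parse_params_text
-- ===== SOURCE A (Python) =====
-- def _parse_params_text(params_text: str) -> list[tuple]:
--     params: list[tuple] = []
--     inner = params_text.strip()
--     if inner.startswith("(") and inner.endswith(")"):
--         inner = inner[1:-1]
--     if not inner:
--         return params
--     for p in _split_top_level(inner, ","):
--         p = p.strip()
--         if not p:
--             continue
--         if ":" in p:
--             n, t = p.split(":", 1)
--             params.append((n.strip(), t.strip()))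
--         else:
--             params.append((p, ""))
--     return params
--
-- def _split_top_level(s: str, sep: str) -> list[str]:
--     """Split on sep but ignore separators inside angle brackets or parentheses."""
--     parts = []
--     buf = []
--     depth_angle = 0
--     depth_paren = 0
--     for ch in s:
--         if ch == '<':
--             depth_angle += 1
--         elif ch == '>':
--             if depth_angle > 0:
--                 depth_angle -= 1
--         elif ch == '(':
--             depth_paren += 1
--         elif ch == ')':
--             if depth_paren > 0:
--                 depth_paren -= 1
--         if ch == sep and depth_angle == 0 and depth_paren == 0:
--             parts.append(''.join(buf))
--             buf = []
--         else:
--             buf.append(ch)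
--     parts.append(''.join(buf))
--     return parts
-- ===== SOURCE B (Python) =====
-- def _flush(params, name, typ, seen_colon):
--     n = ''.join(name).strip()
--     if seen_colon:
--         params.append((n, ''.join(typ).strip()))
--     elif n:
--         params.append((n, ''))
--
--
-- def _parse_params_text(params_text: str) -> list[tuple]:
--     inner = params_text.strip()
--     if inner.startswith("(") and inner.endswith(")"):
--         inner = inner[1:-1]
--     params: list[tuple] = []
--     name: list[str] = []
--     typ: list[str] = []
--     seen_colon = False
--     depth_angle = 0
--     depth_paren = 0
--     for ch in inner:
--         if ch == '<':
--             depth_angle += 1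
--         elif ch == '>' and depth_angle > 0:
--             depth_angle -= 1
--         elif ch == '(':
--             depth_paren += 1
--         elif ch == ')' and depth_paren > 0:
--             depth_paren -= 1
--         if ch == ',' and depth_angle == 0 and depth_paren == 0:
--             _flush(params, name, typ, seen_colon)
--             name, typ, seen_colon = [], [], False
--         elif ch == ':' and not seen_colon:
--             seen_colon = True
--         else:
--             (typ if seen_colon else name).append(ch)
--     _flush(params, name, typ, seen_colon)
--     return params
-- ===== Notes on version B (the rewrite author's own statement) =====
-- stated objective: alternative
-- what changed: Replaced A's two-phase split-into-parts-then-reparse (build substrings at top-level commas, then re-scan each part for ':' and re-split) with a single fused character-level pass that maintains name/type buffers, a first-colon flag and the bracket depths, flushing a tuple at each top-level comma.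
import Mathlib
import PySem

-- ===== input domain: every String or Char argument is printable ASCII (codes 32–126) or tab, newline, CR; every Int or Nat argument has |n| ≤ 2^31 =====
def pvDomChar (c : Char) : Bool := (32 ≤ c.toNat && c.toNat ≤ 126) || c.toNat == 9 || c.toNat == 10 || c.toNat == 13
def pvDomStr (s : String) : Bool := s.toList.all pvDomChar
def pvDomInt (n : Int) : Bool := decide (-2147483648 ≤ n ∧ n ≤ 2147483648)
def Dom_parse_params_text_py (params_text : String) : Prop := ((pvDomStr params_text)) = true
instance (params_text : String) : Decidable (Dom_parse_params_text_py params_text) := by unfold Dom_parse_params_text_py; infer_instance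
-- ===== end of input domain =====

-- B replaces A's split-into-parts-then-reparse with a single fused character pass
-- (name/type buffers, first-colon flag); same return value, different decomposition.

-- ===== PORT A =====
-- A-side helpers: depth update and loop body of _split_top_level, and the body of A's for-loop over parts
def depthA (da dp : Int) (ch : Char) : Int × Int :=
  if ch = '<' then (da + 1, dp)
  else if ch = '>' then (if da > 0 then (da - 1, dp) else (da, dp))
  else if ch = '(' then (da, dp + 1)
  else if ch = ')' then (if dp > 0 then (da, dp - 1) else (da, dp))
  else (da, dp)

def splitStepA (sep : Char) (st : List (List Char) × List Char × Int × Int) (ch : Char) :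
    List (List Char) × List Char × Int × Int :=
  let d := depthA st.2.2.1 st.2.2.2 ch
  if ch = sep ∧ d.1 = 0 ∧ d.2 = 0 then (st.1 ++ [st.2.1], [], d.1, d.2)
  else (st.1, st.2.1 ++ [ch], d.1, d.2)

def split_top_level_py (s : List Char) (sep : Char) : List (List Char) :=
  let fin := s.foldl (splitStepA sep) ([], [], 0, 0)
  fin.1 ++ [fin.2.1]

def parseOneA (params : List (String × String)) (p0 : List Char) : List (String × String) :=
  let p := PySem.Chars.strip p0
  if p = [] then params
  else if PySem.Chars.isIn [':'] p then
    -- p.split(":", 1) with ':' in p: n = prefix before the first ':', t = rest after it (exact here)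
    let n := p.takeWhile (fun c => !(c == ':'))
    let t := (p.dropWhile (fun c => !(c == ':'))).tail
    params ++ [(String.mk (PySem.Chars.strip n), String.mk (PySem.Chars.strip t))]
  else params ++ [(String.mk p, "")]

def parse_params_text_py (params_text : String) : List (String × String) :=
  let inner0 := PySem.Chars.strip params_text.toList
  let inner := if PySem.Chars.startswith inner0 ['('] && PySem.Chars.endswith inner0 [')'] then
      PySem.List.slice inner0 (some 1) (some (-1)) else inner0
  if inner = [] then []
  else (split_top_level_py inner ',').foldl parseOneA []

-- ===== PORT B =====
-- B-side helpers: _flush and the fused single-pass loop body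
def depthB (da dp : Int) (ch : Char) : Int × Int :=
  if ch = '<' then (da + 1, dp)
  else if ch = '>' && da > 0 then (da - 1, dp)
  else if ch = '(' then (da, dp + 1)
  else if ch = ')' && dp > 0 then (da, dp - 1)
  else (da, dp)

def flushB (params : List (String × String)) (name typ : List Char) (seen : Bool) :
    List (String × String) :=
  let n := PySem.Chars.strip name
  if seen then params ++ [(String.mk n, String.mk (PySem.Chars.strip typ))]
  else if n = [] then params
  else params ++ [(String.mk n, "")]

def stepB (st : List (String × String) × List Char × List Char × Bool × Int × Int) (ch : Char) :
    List (String × String) × List Char × List Char × Bool × Int × Int :=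
  let d := depthB st.2.2.2.2.1 st.2.2.2.2.2 ch
  if ch = ',' ∧ d.1 = 0 ∧ d.2 = 0 then
    (flushB st.1 st.2.1 st.2.2.1 st.2.2.2.1, [], [], false, d.1, d.2)
  else if ch = ':' ∧ st.2.2.2.1 = false then (st.1, st.2.1, st.2.2.1, true, d.1, d.2)
  else if st.2.2.2.1 then (st.1, st.2.1, st.2.2.1 ++ [ch], st.2.2.2.1, d.1, d.2)
  else (st.1, st.2.1 ++ [ch], st.2.2.1, st.2.2.2.1, d.1, d.2)

def parse_params_text_py_alt (params_text : String) : List (String × String) :=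
  let inner0 := PySem.Chars.strip params_text.toList
  let inner := if PySem.Chars.startswith inner0 ['('] && PySem.Chars.endswith inner0 [')'] then
      PySem.List.slice inner0 (some 1) (some (-1)) else inner0
  let fin := inner.foldl stepB ([], [], [], false, 0, 0)
  flushB fin.1 fin.2.1 fin.2.2.1 fin.2.2.2.1

-- ===== PRECONDITION & SPEC =====
def Spec_parse_params_text_py (params_text : String) (out : List (String × String)) : Prop := out = parse_params_text_py_alt params_text
instance (params_text : String) (out : List (String × String)) : Decidable (Spec_parse_params_text_py params_text out) := by unfold Spec_parse_params_text_py; infer_instance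

-- ===== CLAIM (what is proved, stated in full; the proofs are below) =====
def Claim_equal_parse_params_text_py : Prop := ∀ (params_text : String), Dom_parse_params_text_py params_text → Spec_parse_params_text_py params_text (parse_params_text_py params_text)

-- ===== LEMMAS AND PROOFS =====

-- proof-side abbreviations: the B-state components that track A's current buffer
def nameOf (buf : List Char) : List Char := buf.takeWhile (fun c => !(c == ':'))
def typOf (buf : List Char) : List Char :=
  if ':' ∈ buf then (buf.dropWhile (fun c => !(c == ':'))).tail else []
def seenOf (buf : List Char) : Bool := decide (':' ∈ buf)
def pvFlush (st : List (String × String) × List Char × List Char × Bool × Int × Int) :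
    List (String × String) := flushB st.1 st.2.1 st.2.2.1 st.2.2.2.1

theorem depthB_eq (da dp : Int) (ch : Char) : depthB da dp ch = depthA da dp ch := by
  unfold depthA depthB
  split_ifs with h1 h2 h3 h4 h5 h6 h7 h8 h9 h10 h11 h12 <;> simp_all

theorem space_imp (c : Char) (h : PySem.Chars.isspace c = true) : (!(c == ':')) = true := by
  by_contra hb
  simp only [Bool.not_eq_true, Bool.not_eq_false', beq_iff_eq] at hb
  subst hb
  simp [show PySem.Chars.isspace ':' = false from rfl] at h

theorem mem_dropWhile_of {α : Type} (p : α → Bool) {c : α} {l : List α}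
    (hc : p c = false) (h : c ∈ l) : c ∈ l.dropWhile p := by
  induction l with
  | nil => cases h
  | cons a t ih =>
    by_cases hp : p a = true
    · rcases List.mem_cons.1 h with rfl | hm
      · rw [hp] at hc; cases hc
      · simpa [List.dropWhile_cons, hp] using ih hm
    · simpa [List.dropWhile_cons, hp] using h

theorem mem_of_dropWhile {α : Type} (p : α → Bool) {c : α} {l : List α}
    (h : c ∈ l.dropWhile p) : c ∈ l :=
  (List.dropWhile_sublist (l := l) (p := p)).mem h

theorem dropWhile_ne_nil_of {α : Type} (p : α → Bool) {c : α} {l : List α}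
    (hc : p c = false) (h : c ∈ l) : l.dropWhile p ≠ [] := by
  intro e
  have := mem_dropWhile_of p hc h
  rw [e] at this
  cases this

theorem takeWhile_append_left {α : Type} (q : α → Bool) (l₁ l₂ : List α)
    (h : ¬ ∀ c ∈ l₁, q c = true) : (l₁ ++ l₂).takeWhile q = l₁.takeWhile q := by
  rw [List.takeWhile_append]
  have hlen : (l₁.takeWhile q).length ≠ l₁.length := by
    intro hlen
    exact h (List.takeWhile_eq_self_iff.1 ((List.takeWhile_prefix q).eq_of_length hlen))
  simp [hlen]

theorem dropWhile_append_left {α : Type} (q : α → Bool) (l₁ l₂ : List α)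
    (h : l₁.dropWhile q ≠ []) : (l₁ ++ l₂).dropWhile q = l₁.dropWhile q ++ l₂ := by
  rw [List.dropWhile_append]
  simp [List.isEmpty_iff, h]

theorem dropWhile_dropWhile_of {α : Type} (p q : α → Bool) (hpq : ∀ c, p c = true → q c = true)
    (l : List α) : (l.dropWhile p).dropWhile q = l.dropWhile q := by
  induction l with
  | nil => rfl
  | cons a t ih =>
    by_cases hp : p a = true
    · simp [List.dropWhile_cons, hp, hpq a hp, ih]
    · simp [List.dropWhile_cons, hp]

theorem takeWhile_dropWhile_of {α : Type} (p q : α → Bool) (hpq : ∀ c, p c = true → q c = true)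
    (l : List α) : (l.dropWhile p).takeWhile q = (l.takeWhile q).dropWhile p := by
  induction l with
  | nil => rfl
  | cons a t ih =>
    by_cases hp : p a = true
    · simp [List.dropWhile_cons, List.takeWhile_cons, hp, hpq a hp, ih]
    · by_cases hq : q a = true
      · simp [List.dropWhile_cons, List.takeWhile_cons, hp, hq]
      · simp [List.dropWhile_cons, List.takeWhile_cons, hp, hq]

theorem rstrip_decomp (l : List Char) :
    ∃ w, l = PySem.Chars.rstrip l ++ w ∧ ∀ c ∈ w, PySem.Chars.isspace c = true := by
  refine ⟨(l.reverse.takeWhile PySem.Chars.isspace).reverse, ?_, ?_⟩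
  · unfold PySem.Chars.rstrip
    conv_lhs => rw [← l.reverse_reverse, ← List.takeWhile_append_dropWhile
      (p := PySem.Chars.isspace) (l := l.reverse)]
    rw [List.reverse_append]
  · intro c hc
    exact List.mem_takeWhile_imp (List.mem_reverse.1 hc)

theorem rstrip_append (a w : List Char) (hw : ∀ c ∈ w, PySem.Chars.isspace c = true) :
    PySem.Chars.rstrip (a ++ w) = PySem.Chars.rstrip a := by
  unfold PySem.Chars.rstrip
  rw [List.reverse_append]
  have hnil : w.reverse.dropWhile PySem.Chars.isspace = [] :=
    List.dropWhile_eq_nil_iff.2 (fun c hc => hw c (List.mem_reverse.1 hc))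
  rw [List.dropWhile_append, hnil]
  simp

theorem rstrip_eq_nil (w : List Char) (hw : ∀ c ∈ w, PySem.Chars.isspace c = true) :
    PySem.Chars.rstrip w = [] := by
  have := rstrip_append [] w hw
  simpa [PySem.Chars.rstrip] using this

theorem strip_append (a w : List Char) (hw : ∀ c ∈ w, PySem.Chars.isspace c = true) :
    PySem.Chars.strip (a ++ w) = PySem.Chars.strip a := by
  unfold PySem.Chars.strip PySem.Chars.lstrip
  rw [List.dropWhile_append]
  by_cases he : (a.dropWhile PySem.Chars.isspace).isEmpty = true
  · rw [if_pos he]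
    rw [List.isEmpty_iff] at he
    rw [he]
    rw [rstrip_eq_nil _ (fun c hc => hw c (mem_of_dropWhile _ hc))]
    rfl
  · rw [if_neg he]
    exact rstrip_append _ w hw

theorem lstrip_strip (l : List Char) :
    PySem.Chars.strip (PySem.Chars.lstrip l) = PySem.Chars.strip l := by
  unfold PySem.Chars.strip PySem.Chars.lstrip
  rw [dropWhile_dropWhile_of _ _ (fun c h => h)]

theorem mem_strip_of (c : Char) (l : List Char) (hc : PySem.Chars.isspace c = false)
    (h : c ∈ l) : c ∈ PySem.Chars.strip l := by
  unfold PySem.Chars.strip PySem.Chars.rstrip PySem.Chars.lstrip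
  rw [List.mem_reverse]
  exact mem_dropWhile_of _ hc (List.mem_reverse.2 (mem_dropWhile_of _ hc h))

theorem mem_of_mem_strip (c : Char) (l : List Char) (h : c ∈ PySem.Chars.strip l) : c ∈ l := by
  unfold PySem.Chars.strip PySem.Chars.rstrip PySem.Chars.lstrip at h
  rw [List.mem_reverse] at h
  have h1 := mem_of_dropWhile _ h
  rw [List.mem_reverse] at h1
  exact mem_of_dropWhile _ h1

theorem colon_mem_strip (l : List Char) : ':' ∈ PySem.Chars.strip l ↔ ':' ∈ l :=
  ⟨mem_of_mem_strip ':' l, fun h => mem_strip_of ':' l rfl h⟩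

theorem isIn_colon (l : List Char) : PySem.Chars.isIn [':'] l = true ↔ ':' ∈ l := by
  rw [PySem.Chars.isIn_iff_infix]
  constructor
  · intro h
    exact List.singleton_sublist.1 h.sublist
  · intro h
    obtain ⟨s, t, rfl⟩ := List.append_of_mem h
    exact ⟨s, t, by simp⟩

theorem strip_takeWhile (l : List Char) (h : ':' ∈ l) :
    PySem.Chars.strip ((PySem.Chars.strip l).takeWhile (fun c => !(c == ':')))
      = PySem.Chars.strip (l.takeWhile (fun c => !(c == ':'))) := by
  obtain ⟨w, hdec, hw⟩ := rstrip_decomp (PySem.Chars.lstrip l)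
  have hcs : ':' ∈ PySem.Chars.strip l := (colon_mem_strip l).2 h
  have h1 : (PySem.Chars.lstrip l).takeWhile (fun c => !(c == ':'))
      = (PySem.Chars.strip l).takeWhile (fun c => !(c == ':')) := by
    conv_lhs => rw [hdec]
    exact takeWhile_append_left _ _ w (by
      intro hall
      have := hall ':' hcs
      simp at this)
  have h2 : (PySem.Chars.lstrip l).takeWhile (fun c => !(c == ':'))
      = PySem.Chars.lstrip (l.takeWhile (fun c => !(c == ':'))) := by
    unfold PySem.Chars.lstrip
    exact takeWhile_dropWhile_of _ _ space_imp l
  rw [← h1, h2, lstrip_strip]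

theorem strip_dropWhile (l : List Char) (h : ':' ∈ l) :
    PySem.Chars.strip (((PySem.Chars.strip l).dropWhile (fun c => !(c == ':'))).tail)
      = PySem.Chars.strip ((l.dropWhile (fun c => !(c == ':'))).tail) := by
  obtain ⟨w, hdec, hw⟩ := rstrip_decomp (PySem.Chars.lstrip l)
  have hcs : ':' ∈ PySem.Chars.strip l := (colon_mem_strip l).2 h
  have hne : (PySem.Chars.strip l).dropWhile (fun c => !(c == ':')) ≠ [] :=
    dropWhile_ne_nil_of _ (by simp) hcs
  have hA : (PySem.Chars.lstrip l).dropWhile (fun c => !(c == ':'))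
      = (PySem.Chars.strip l).dropWhile (fun c => !(c == ':')) ++ w := by
    conv_lhs => rw [hdec]
    exact dropWhile_append_left _ _ w hne
  have hB : (PySem.Chars.lstrip l).dropWhile (fun c => !(c == ':'))
      = l.dropWhile (fun c => !(c == ':')) := by
    unfold PySem.Chars.lstrip
    exact dropWhile_dropWhile_of _ _ space_imp l
  have htail : (l.dropWhile (fun c => !(c == ':'))).tail
      = ((PySem.Chars.strip l).dropWhile (fun c => !(c == ':'))).tail ++ w := by
    rw [← hB, hA]
    exact List.tail_append_of_ne_nil hne
  rw [htail, strip_append _ w hw]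

theorem flush_eq (params : List (String × String)) (buf : List Char) :
    flushB params (nameOf buf) (typOf buf) (seenOf buf) = parseOneA params buf := by
  by_cases h : ':' ∈ buf
  · have hseen : seenOf buf = true := by simp [seenOf, h]
    have hcs : ':' ∈ PySem.Chars.strip buf := (colon_mem_strip buf).2 h
    have hne : PySem.Chars.strip buf ≠ [] := by
      intro e; rw [e] at hcs; cases hcs
    have hin : PySem.Chars.isIn [':'] (PySem.Chars.strip buf) = true := (isIn_colon _).2 hcs
    unfold flushB parseOneA nameOf typOf
    rw [hseen]
    simp only [h, if_true, if_neg hne, hin, if_pos]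
    rw [strip_takeWhile buf h, strip_dropWhile buf h]
  · have hseen : seenOf buf = false := by simp [seenOf, h]
    have hname : nameOf buf = buf := by
      unfold nameOf
      rw [List.takeWhile_eq_self_iff]
      intro c hc
      simp only [Bool.not_eq_true', beq_eq_false_iff_ne]
      intro e; subst e; exact h hc
    have hnin : PySem.Chars.isIn [':'] (PySem.Chars.strip buf) = false := by
      rw [Bool.eq_false_iff]
      intro hin
      exact h (mem_of_mem_strip ':' buf ((isIn_colon _).1 hin))
    unfold flushB parseOneA
    rw [hseen, hname]
    by_cases he : PySem.Chars.strip buf = []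
    · simp [he]
    · simp [he, hnin]

-- the B-state invariant is preserved by any non-comma step
theorem nameOf_nil : nameOf [] = [] := rfl
theorem typOf_nil : typOf [] = [] := rfl
theorem seenOf_nil : seenOf [] = false := rfl

theorem inv_step_seen (buf : List Char) (ch : Char) (h : ':' ∈ buf) :
    nameOf (buf ++ [ch]) = nameOf buf ∧ typOf (buf ++ [ch]) = typOf buf ++ [ch] := by
  have hne : buf.dropWhile (fun c => !(c == ':')) ≠ [] := dropWhile_ne_nil_of _ (by simp) h
  constructor
  · unfold nameOf
    exact takeWhile_append_left _ _ [ch] (by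
      intro hall
      have := hall ':' h
      simp at this)
  · unfold typOf
    have h2 : ':' ∈ buf ++ [ch] := List.mem_append_left _ h
    rw [if_pos h2, if_pos h, dropWhile_append_left _ _ [ch] hne,
      List.tail_append_of_ne_nil hne]

theorem inv_step_colon (buf : List Char) (h : ':' ∉ buf) :
    nameOf (buf ++ [':']) = nameOf buf ∧ typOf (buf ++ [':']) = [] ∧
      seenOf (buf ++ [':']) = true := by
  have hall : ∀ c ∈ buf, (!(c == ':')) = true := by
    intro c hc
    simp only [Bool.not_eq_true', beq_eq_false_iff_ne]
    intro e; subst e; exact h hc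
  have hself : buf.takeWhile (fun c => !(c == ':')) = buf := List.takeWhile_eq_self_iff.2 hall
  have hdrop : buf.dropWhile (fun c => !(c == ':')) = [] := List.dropWhile_eq_nil_iff.2 hall
  refine ⟨?_, ?_, by simp [seenOf]⟩
  · unfold nameOf
    rw [List.takeWhile_append, hself]
    simp
  · unfold typOf
    rw [if_pos (by simp : ':' ∈ buf ++ [':'])]
    rw [List.dropWhile_append, hdrop]
    simp

theorem inv_step_plain (buf : List Char) (ch : Char) (h : ':' ∉ buf) (hch : ch ≠ ':') :
    nameOf (buf ++ [ch]) = nameOf buf ++ [ch] ∧ typOf (buf ++ [ch]) = [] ∧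
      seenOf (buf ++ [ch]) = false := by
  have hnm : ':' ∉ buf ++ [ch] := by
    intro hm
    rcases List.mem_append.1 hm with hm | hm
    · exact h hm
    · simp at hm; exact hch hm.symm
  have hall : ∀ c ∈ buf ++ [ch], (!(c == ':')) = true := by
    intro c hc
    simp only [Bool.not_eq_true', beq_eq_false_iff_ne]
    intro e; subst e; exact hnm hc
  have hself : buf.takeWhile (fun c => !(c == ':')) = buf :=
    List.takeWhile_eq_self_iff.2 (fun c hc => hall c (List.mem_append_left _ hc))
  refine ⟨?_, ?_, by simp [seenOf, hnm]⟩
  · unfold nameOf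
    rw [List.takeWhile_eq_self_iff.2 hall, hself]
  · unfold typOf
    rw [if_neg hnm]

theorem splitStepA_eval (sep : Char) (parts : List (List Char)) (buf : List Char)
    (da dp : Int) (ch : Char) :
    splitStepA sep (parts, buf, da, dp) ch =
      if ch = sep ∧ (depthA da dp ch).1 = 0 ∧ (depthA da dp ch).2 = 0 then
        (parts ++ [buf], [], (depthA da dp ch).1, (depthA da dp ch).2)
      else (parts, buf ++ [ch], (depthA da dp ch).1, (depthA da dp ch).2) := rfl

theorem stepB_eval (params : List (String × String)) (name typ : List Char) (seen : Bool)
    (da dp : Int) (ch : Char) :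
    stepB (params, name, typ, seen, da, dp) ch =
      if ch = ',' ∧ (depthA da dp ch).1 = 0 ∧ (depthA da dp ch).2 = 0 then
        (flushB params name typ seen, [], [], false, (depthA da dp ch).1, (depthA da dp ch).2)
      else if ch = ':' ∧ seen = false then
        (params, name, typ, true, (depthA da dp ch).1, (depthA da dp ch).2)
      else if seen then
        (params, name, typ ++ [ch], seen, (depthA da dp ch).1, (depthA da dp ch).2)
      else (params, name ++ [ch], typ, seen, (depthA da dp ch).1, (depthA da dp ch).2) := by
  unfold stepB
  rw [show (params, name, typ, seen, da, dp).2.2.2.2.1 = da from rfl]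
  rw [depthB_eq]

theorem splitA_shift (s : List Char) : ∀ (parts : List (List Char)) (buf : List Char)
    (da dp : Int),
    s.foldl (splitStepA ',') (parts, buf, da, dp)
      = (parts ++ (s.foldl (splitStepA ',') ([], buf, da, dp)).1,
         (s.foldl (splitStepA ',') ([], buf, da, dp)).2) := by
  induction s with
  | nil => intro parts buf da dp; simp
  | cons ch s ih =>
    intro parts buf da dp
    simp only [List.foldl_cons, splitStepA_eval]
    by_cases hc : ch = ',' ∧ (depthA da dp ch).1 = 0 ∧ (depthA da dp ch).2 = 0
    · rw [if_pos hc, if_pos hc]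
      simp only [List.nil_append]
      rw [ih (parts ++ [buf]), ih [buf]]
      try simp
    · rw [if_neg hc, if_neg hc, ih parts]
      try simp

theorem key (s : List Char) : ∀ (buf : List Char) (da dp : Int)
    (params : List (String × String)),
    ((s.foldl (splitStepA ',') ([], buf, da, dp)).1
        ++ [(s.foldl (splitStepA ',') ([], buf, da, dp)).2.1]).foldl parseOneA params
      = pvFlush (s.foldl stepB (params, nameOf buf, typOf buf, seenOf buf, da, dp)) := by
  induction s with
  | nil =>
    intro buf da dp params
    simp only [List.foldl_nil, List.nil_append, List.foldl_cons]
    exact (flush_eq params buf).symm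
  | cons ch s ih =>
    intro buf da dp params
    simp only [List.foldl_cons, splitStepA_eval, stepB_eval]
    by_cases hc : ch = ',' ∧ (depthA da dp ch).1 = 0 ∧ (depthA da dp ch).2 = 0
    · rw [if_pos hc, if_pos hc]
      simp only [List.nil_append]
      rw [splitA_shift s [buf]]
      have := ih [] (depthA da dp ch).1 (depthA da dp ch).2 (parseOneA params buf)
      rw [nameOf_nil, typOf_nil, seenOf_nil] at this
      rw [flush_eq params buf]
      rw [← this]
      simp [List.foldl_append]
    · rw [if_neg hc, if_neg hc]
      by_cases hs : seenOf buf = true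
      · have hmem : ':' ∈ buf := by simpa [seenOf] using hs
        have hcol : ¬ (ch = ':' ∧ seenOf buf = false) := by simp [hs]
        rw [if_neg hcol, if_pos hs]
        obtain ⟨hn, ht⟩ := inv_step_seen buf ch hmem
        have hsn : seenOf (buf ++ [ch]) = true := by
          simp [seenOf, List.mem_append_left _ hmem]
        have := ih (buf ++ [ch]) (depthA da dp ch).1 (depthA da dp ch).2 params
        rw [hn, ht, hsn] at this
        rw [hs]
        exact this
      · have hmem : ':' ∉ buf := by simpa [seenOf] using hs
        have hsf : seenOf buf = false := by simp [seenOf, hmem]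
        by_cases hch : ch = ':'
        · subst hch
          rw [if_pos ⟨rfl, hsf⟩]
          obtain ⟨hn, ht, hsn⟩ := inv_step_colon buf hmem
          have := ih (buf ++ [':']) (depthA da dp ':').1 (depthA da dp ':').2 params
          rw [hn, ht, hsn] at this
          rw [this]
          have ht0 : typOf buf = [] := by unfold typOf; rw [if_neg hmem]
          rw [ht0]
        · rw [if_neg (by simp [hch]), if_neg (by simp [hs])]
          obtain ⟨hn, ht, hsn⟩ := inv_step_plain buf ch hmem hch
          have := ih (buf ++ [ch]) (depthA da dp ch).1 (depthA da dp ch).2 params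
          rw [hn, ht, hsn] at this
          rw [this]
          have ht0 : typOf buf = [] := by unfold typOf; rw [if_neg hmem]
          rw [ht0, hsf]

theorem ports_agree (params_text : String) :
    parse_params_text_py params_text = parse_params_text_py_alt params_text := by
  simp only [parse_params_text_py, parse_params_text_py_alt, split_top_level_py]
  generalize (if PySem.Chars.startswith (PySem.Chars.strip params_text.toList) ['('] &&
      PySem.Chars.endswith (PySem.Chars.strip params_text.toList) [')'] then
      PySem.List.slice (PySem.Chars.strip params_text.toList) (some 1) (some (-1))
    else PySem.Chars.strip params_text.toList) = inner
  by_cases h : inner = []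
  · subst h
    rfl
  · rw [if_neg h]
    have := key inner [] 0 0 []
    rw [nameOf_nil, typOf_nil, seenOf_nil] at this
    exact this

-- ===== VERDICT (by name: the statement is the Claim_ definition above) =====
theorem parse_params_text_py_spec : Claim_equal_parse_params_text_py := by
  intro params_text _
  unfold Spec_parse_params_text_py
  exact ports_agree params_text
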